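-- pv_equiv track=rewrite | github.com/niminim/NLP-code | TTS/audiobooks_studio/dragons2.py | convert_latin_numbers_to_words
-- ===== SOURCE A (Python) =====
-- def convert_latin_numbers_to_words(text):
--     """
--     Converts Latin numerals (I. to X.) into their word equivalents followed by '-'.
--     Does nothing for Latin numerals without a '.'.
--
--     Args:
--         text (str): Input text containing Latin numerals.
--
--     Returns:
--         str: Text with Latin numerals followed by '.' replaced by words followed by '-'.
--     """
--     # Mapping of Latin numerals (with '.') to their word equivalents
--     latin_to_words = {
--         '\nI.': ' One -', '\nII.': ' Two -', '\nIII.': ' Three -', '\nIV.': ' Four -',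
--         '\nV.': ' Five -', '\nVI.': ' Six -', '\nVII.': ' Seven -', '\nVIII.': ' Eight -',
--         '\nIX.': ' Nine -', '\nX.': ' Ten -'
--     }
--
--     # Replace numerals followed by '.' with their word equivalents
--     for numeral, word in latin_to_words.items():
--         text = text.replace(numeral, word)
--
--     return text
-- ===== SOURCE B (Python) =====
-- import re
--
-- _LATIN_TO_WORDS = {
--     '\nI.': ' One -', '\nII.': ' Two -', '\nIII.': ' Three -', '\nIV.': ' Four -',
--     '\nV.': ' Five -', '\nVI.': ' Six -', '\nVII.': ' Seven -', '\nVIII.': ' Eight -',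
--     '\nIX.': ' Nine -', '\nX.': ' Ten -'
-- }
-- _PATTERN = re.compile('|'.join(re.escape(k) for k in _LATIN_TO_WORDS))
--
--
-- def convert_latin_numbers_to_words(text):
--     """Single left-to-right pass: one compiled alternation over the ten
--     '\\n<numeral>.' tokens, each match replaced via a table lookup."""
--     return _PATTERN.sub(lambda m: _LATIN_TO_WORDS[m.group(0)], text)
-- ===== Notes on version B (the rewrite author's own statement) =====
-- stated objective: idiomatic
-- what changed: Ten sequential full-text str.replace passes are replaced by one compiled regex alternation over the ten escaped keys, applied in a single re.sub pass whose callback looks the replacement up in the table.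
import Mathlib
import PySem

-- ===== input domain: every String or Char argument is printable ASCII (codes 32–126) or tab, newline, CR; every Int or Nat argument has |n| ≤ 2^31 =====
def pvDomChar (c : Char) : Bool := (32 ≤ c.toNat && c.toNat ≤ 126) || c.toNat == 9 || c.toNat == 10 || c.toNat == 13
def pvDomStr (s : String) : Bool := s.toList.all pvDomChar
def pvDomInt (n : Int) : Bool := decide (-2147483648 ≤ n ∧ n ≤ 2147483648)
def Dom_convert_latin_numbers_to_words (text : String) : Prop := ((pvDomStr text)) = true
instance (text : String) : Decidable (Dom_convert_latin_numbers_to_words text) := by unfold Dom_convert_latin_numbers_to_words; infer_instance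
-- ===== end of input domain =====

-- B replaces A's ten sequential full-text replace passes by one single left-to-right scan
-- (compiled regex alternation + table lookup); proved to return the same string on every input.


-- ===== PORT A =====
-- the dict literal latin_to_words, as an association list in insertion order
def latinToWords : List (String × String) :=
  [("\nI.", " One -"), ("\nII.", " Two -"), ("\nIII.", " Three -"), ("\nIV.", " Four -"),
   ("\nV.", " Five -"), ("\nVI.", " Six -"), ("\nVII.", " Seven -"), ("\nVIII.", " Eight -"),
   ("\nIX.", " Nine -"), ("\nX.", " Ten -")]

-- for numeral, word in latin_to_words.items(): text = text.replace(numeral, word)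
def convert_latin_numbers_to_words (text : String) : String :=
  latinToWords.foldl (fun t kw => PySem.Str.replace t kw.1 kw.2) text

-- ===== PORT B =====
-- the compiled alternation: the ten alternatives in pattern order, each with its replacement
def latinTable : List (List Char × List Char) :=
  [(['\n','I','.'], [' ','O','n','e',' ','-']),
   (['\n','I','I','.'], [' ','T','w','o',' ','-']),
   (['\n','I','I','I','.'], [' ','T','h','r','e','e',' ','-']),
   (['\n','I','V','.'], [' ','F','o','u','r',' ','-']),
   (['\n','V','.'], [' ','F','i','v','e',' ','-']),
   (['\n','V','I','.'], [' ','S','i','x',' ','-']),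
   (['\n','V','I','I','.'], [' ','S','e','v','e','n',' ','-']),
   (['\n','V','I','I','I','.'], [' ','E','i','g','h','t',' ','-']),
   (['\n','I','X','.'], [' ','N','i','n','e',' ','-']),
   (['\n','X','.'], [' ','T','e','n',' ','-'])]

-- re.sub's single pass: at each position try the alternatives in order; on a match emit the
-- looked-up replacement and resume after the match, otherwise emit the character.
def scanLatin : List Char → List Char
  | [] => []
  | c :: t =>
    match latinTable.find? (fun kw => kw.1.isPrefixOf (c :: t)) with
    | some kw => kw.2 ++ scanLatin (t.drop (kw.1.length - 1))
    | none => c :: scanLatin t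
termination_by l => l.length
decreasing_by
  · simp only [List.length_cons]
    have : (t.drop (kw.1.length - 1)).length ≤ t.length := by
      simp
    omega
  · simp

def convert_latin_numbers_to_words_alt (text : String) : String :=
  String.ofList (scanLatin text.toList)

-- ===== PRECONDITION & SPEC =====
def Spec_convert_latin_numbers_to_words (text : String) (out : String) : Prop := out = convert_latin_numbers_to_words_alt text
instance (text : String) (out : String) : Decidable (Spec_convert_latin_numbers_to_words text out) := by unfold Spec_convert_latin_numbers_to_words; infer_instance

-- ===== CLAIM (what is proved, stated in full; the proofs are below) =====
def Claim_equal_convert_latin_numbers_to_words : Prop := ∀ (text : String), Dom_convert_latin_numbers_to_words text → Spec_convert_latin_numbers_to_words text (convert_latin_numbers_to_words text)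

-- ===== LEMMAS AND PROOFS =====

-- abbreviation for A's composition of replace passes, on the char-list side
def foldRepl (T : List (List Char × List Char)) (cs : List Char) : List Char :=
  T.foldl (fun acc kw => PySem.Chars.replace acc kw.1 kw.2) cs

-- ---- characterization of PySem.Chars.replace (nonempty pattern) as a fuel-free scan ----

lemma go_zero (old new l acc : List Char) :
    PySem.Chars.replace.go old new 0 l acc = acc.reverse ++ l := by
  simp [PySem.Chars.replace.go]

lemma go_nil (old new acc : List Char) (f : Nat) :
    PySem.Chars.replace.go old new f [] acc = acc.reverse := by
  cases f <;> simp [PySem.Chars.replace.go]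

lemma go_succ_pos (old new acc t : List Char) (c : Char) (f : Nat) (h : old <+: (c::t)) :
    PySem.Chars.replace.go old new (f+1) (c::t) acc
      = PySem.Chars.replace.go old new f (List.drop old.length (c::t)) (new.reverse ++ acc) := by
  simp [PySem.Chars.replace.go, h]

lemma go_succ_neg (old new acc t : List Char) (c : Char) (f : Nat) (h : ¬ old <+: (c::t)) :
    PySem.Chars.replace.go old new (f+1) (c::t) acc = PySem.Chars.replace.go old new f t (c :: acc) := by
  simp [PySem.Chars.replace.go, h]

lemma go_acc (old new : List Char) : ∀ (f : Nat) (l acc : List Char),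
    PySem.Chars.replace.go old new f l acc = acc.reverse ++ PySem.Chars.replace.go old new f l [] := by
  intro f
  induction f with
  | zero => intro l acc; rw [go_zero, go_zero]; simp
  | succ f ih =>
    intro l acc
    cases l with
    | nil => rw [go_nil, go_nil]; simp
    | cons c t =>
      by_cases h : old <+: (c::t)
      · rw [go_succ_pos _ _ _ _ _ _ h, go_succ_pos _ _ _ _ _ _ h,
          ih _ (new.reverse ++ acc), ih _ (new.reverse ++ [])]
        simp
      · rw [go_succ_neg _ _ _ _ _ _ h, go_succ_neg _ _ _ _ _ _ h,
          ih t (c :: acc), ih t (c :: [])]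
        simp

lemma go_fuel (old new : List Char) (hold : old ≠ []) : ∀ (f₁ f₂ : Nat) (l : List Char),
    l.length ≤ f₁ → l.length ≤ f₂ →
    PySem.Chars.replace.go old new f₁ l [] = PySem.Chars.replace.go old new f₂ l [] := by
  intro f₁
  induction f₁ with
  | zero =>
    intro f₂ l h1 h2
    have : l = [] := by cases l <;> simp_all
    subst this
    rw [go_nil, go_nil]
  | succ f ih =>
    intro f₂ l h1 h2
    cases l with
    | nil => rw [go_nil, go_nil]
    | cons c t =>
      cases f₂ with
      | zero => simp at h2
      | succ g =>
        have hlen : old.length ≥ 1 := by cases old <;> simp_all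
        have hd : (List.drop old.length (c::t)).length ≤ t.length := by
          simp only [List.length_drop, List.length_cons]; omega
        simp only [List.length_cons] at h1 h2
        by_cases h : old <+: (c::t)
        · rw [go_succ_pos _ _ _ _ _ _ h, go_succ_pos _ _ _ _ _ _ h, go_acc, go_acc old new g]
          rw [ih g (List.drop old.length (c::t)) (by omega) (by omega)]
        · rw [go_succ_neg _ _ _ _ _ _ h, go_succ_neg _ _ _ _ _ _ h, go_acc, go_acc old new g]
          rw [ih g t (by omega) (by omega)]

lemma replace_nil (old new : List Char) (hold : old ≠ []) : PySem.Chars.replace [] old new = [] := by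
  simp [PySem.Chars.replace, List.isEmpty_iff, hold, PySem.Chars.replace.go]

lemma replace_pos (old new l : List Char) (hold : old ≠ []) (h : old <+: l) :
    PySem.Chars.replace l old new = new ++ PySem.Chars.replace (l.drop old.length) old new := by
  cases l with
  | nil =>
    exfalso
    have := List.IsPrefix.length_le h
    cases old <;> simp_all
  | cons c t =>
    have hlen : old.length ≥ 1 := by cases old <;> simp_all
    rw [show PySem.Chars.replace (c::t) old new
        = PySem.Chars.replace.go old new (c::t).length (c::t) [] by
      simp [PySem.Chars.replace, List.isEmpty_iff, hold]]
    rw [show PySem.Chars.replace (List.drop old.length (c::t)) old new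
        = PySem.Chars.replace.go old new (List.drop old.length (c::t)).length
            (List.drop old.length (c::t)) [] by
      simp [PySem.Chars.replace, List.isEmpty_iff, hold]]
    rw [show (c::t).length = t.length + 1 by simp]
    rw [go_succ_pos _ _ _ _ _ _ h, go_acc]
    simp only [List.append_nil, List.reverse_reverse]
    congr 1
    exact go_fuel old new hold t.length (List.drop old.length (c::t)).length _
      (by simp only [List.length_drop, List.length_cons]; omega) le_rfl

lemma replace_neg (old new : List Char) (c : Char) (t : List Char) (h : ¬ old <+: (c :: t)) :
    PySem.Chars.replace (c :: t) old new = c :: PySem.Chars.replace t old new := by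
  have hold : old ≠ [] := by rintro rfl; exact h (List.nil_prefix)
  rw [show PySem.Chars.replace (c::t) old new
      = PySem.Chars.replace.go old new (c::t).length (c::t) [] by
    simp [PySem.Chars.replace, List.isEmpty_iff, hold]]
  rw [show PySem.Chars.replace t old new = PySem.Chars.replace.go old new t.length t [] by
    simp [PySem.Chars.replace, List.isEmpty_iff, hold]]
  rw [show (c::t).length = t.length + 1 by simp]
  rw [go_succ_neg _ _ _ _ _ _ h, go_acc]
  simp

-- ---- pass-through lemmas ----

-- a key starting with '\n' never matches inside a newline-free block
lemma pass_nonl (k' w : List Char) (u : List Char) (hu : '\n' ∉ u) : ∀ v,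
    PySem.Chars.replace (u ++ v) ('\n'::k') w = u ++ PySem.Chars.replace v ('\n'::k') w := by
  induction u with
  | nil => intro v; simp
  | cons c u' ih =>
    intro v
    have hc : c ≠ '\n' := fun hc => hu (by simp [hc])
    have hnp : ¬ ('\n'::k') <+: (c :: (u' ++ v)) := by
      intro hp
      exact hc ((List.cons_prefix_cons.mp hp).1.symm)
    rw [List.cons_append, replace_neg _ _ _ _ hnp, ih (fun hm => hu (by simp [hm]))]
    simp

lemma not_prefix_append {a b X : List Char} (h1 : ¬ a <+: b) (h2 : ¬ b <+: a) : ¬ a <+: (b ++ X) := by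
  intro h
  rcases (List.prefix_or_prefix_of_prefix h (List.prefix_append b X)) with hp | hp
  · exact h1 hp
  · exact h2 hp

-- replacing with a space-headed word cannot create a new occurrence of a space-free pattern at the head
lemma pres_no_prefix (k w' : List Char) (hk : k ≠ []) :
    ∀ (t p : List Char), p ≠ [] → ' ' ∉ p → ¬ p <+: t →
      ¬ p <+: PySem.Chars.replace t k (' '::w') := by
  suffices H : ∀ (n : Nat) (t p : List Char), t.length ≤ n → p ≠ [] → ' ' ∉ p → ¬ p <+: t →
      ¬ p <+: PySem.Chars.replace t k (' '::w') by
    intro t p hp hsp h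
    exact H t.length t p le_rfl hp hsp h
  intro n
  induction n with
  | zero =>
    intro t p hlen hp hsp h
    have : t = [] := by cases t <;> simp_all
    subst this
    rw [replace_nil _ _ hk]
    intro hc
    exact hp (List.prefix_nil.mp hc)
  | succ n ih =>
    intro t p hlen hp hsp h
    cases t with
    | nil =>
      rw [replace_nil _ _ hk]
      intro hc
      exact hp (List.prefix_nil.mp hc)
    | cons c t' =>
      by_cases hpre : k <+: (c :: t')
      · rw [replace_pos _ _ _ hk hpre]
        intro hc
        cases p with
        | nil => exact hp rfl
        | cons a p'' =>
          have : a = ' ' := (List.cons_prefix_cons.mp hc).1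
          exact hsp (by simp [this])
      · rw [replace_neg _ _ _ _ hpre]
        intro hc
        cases p with
        | nil => exact hp rfl
        | cons a p' =>
          obtain ⟨hac, hp'⟩ := List.cons_prefix_cons.mp hc
          subst hac
          cases p' with
          | nil => exact h (by simp)
          | cons b p'' =>
            exact ih t' (b :: p'') (by simp at hlen ⊢; omega) (by simp)
              (fun hm => hsp (by simp_all))
              (fun hm => h (List.cons_prefix_cons.mpr ⟨rfl, hm⟩)) hp'

-- ---- facts about the concrete table (all by decide) ----

def keyShape (kw : List Char × List Char) : Prop :=
  (∃ t, kw.1 = '\n'::t ∧ t ≠ [] ∧ '\n' ∉ t ∧ ' ' ∉ t) ∧ (∃ w', kw.2 = ' '::w' ∧ '\n' ∉ (' '::w'))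

lemma table_shape : ∀ kw ∈ latinTable, keyShape kw := by
  intro kw h
  fin_cases h <;> exact ⟨⟨_, rfl, by decide, by decide, by decide⟩, ⟨_, rfl, by decide⟩⟩

lemma table_incomp : ∀ a ∈ latinTable, ∀ b ∈ latinTable, a ≠ b → ¬ a.1 <+: b.1 := by
  decide

lemma table_nodup : latinTable.Nodup := by
  decide

-- ---- fold lemmas ----

lemma foldRepl_nil (T : List (List Char × List Char)) (hT : ∀ kw ∈ T, keyShape kw) :
    foldRepl T [] = [] := by
  induction T with
  | nil => rfl
  | cons kw T ih =>
    have hs := (hT kw (by simp)).1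
    obtain ⟨t, hk, -, -, -⟩ := hs
    show foldRepl T (PySem.Chars.replace [] kw.1 kw.2) = []
    rw [replace_nil _ _ (by simp [hk])]
    exact ih (fun kw' h => hT kw' (by simp [h]))

lemma foldRepl_pass_nonl (T : List (List Char × List Char)) (hT : ∀ kw ∈ T, keyShape kw)
    (u : List Char) (hu : '\n' ∉ u) : ∀ v, foldRepl T (u ++ v) = u ++ foldRepl T v := by
  induction T with
  | nil => intro v; rfl
  | cons kw T ih =>
    intro v
    obtain ⟨⟨t, hk, -, -, -⟩, -⟩ := hT kw (by simp)
    show foldRepl T (PySem.Chars.replace (u ++ v) kw.1 kw.2) = u ++ foldRepl T (PySem.Chars.replace v kw.1 kw.2)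
    rw [hk, pass_nonl t kw.2 u hu v, ← hk]
    exact ih (fun kw' h => hT kw' (by simp [h])) (PySem.Chars.replace v kw.1 kw.2)

-- keys incomparable with k pass over the block k itself
lemma foldRepl_pass_key (T : List (List Char × List Char)) (hT : ∀ kw ∈ T, keyShape kw)
    (tk : List Char) (hnl : '\n' ∉ tk)
    (hinc : ∀ kw ∈ T, ¬ kw.1 <+: ('\n'::tk) ∧ ¬ ('\n'::tk) <+: kw.1) :
    ∀ X, foldRepl T (('\n'::tk) ++ X) = ('\n'::tk) ++ foldRepl T X := by
  induction T with
  | nil => intro X; rfl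
  | cons kw T ih =>
    intro X
    obtain ⟨⟨t, hk, -, -, -⟩, -⟩ := hT kw (by simp)
    obtain ⟨h1, h2⟩ := hinc kw (by simp)
    show foldRepl T (PySem.Chars.replace (('\n'::tk) ++ X) kw.1 kw.2)
      = ('\n'::tk) ++ foldRepl T (PySem.Chars.replace X kw.1 kw.2)
    rw [show ('\n'::tk) ++ X = '\n' :: (tk ++ X) by simp,
      replace_neg _ _ _ _ (by
        have := not_prefix_append (X := X) h1 h2
        simpa using this),
      hk, pass_nonl t kw.2 tk hnl X, ← hk]
    have := ih (fun kw' h => hT kw' (by simp [h])) (fun kw' h => hinc kw' (by simp [h]))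
      (PySem.Chars.replace X kw.1 kw.2)
    simpa using this

lemma foldRepl_cons_nomatch (T : List (List Char × List Char)) (hT : ∀ kw ∈ T, keyShape kw)
    (c : Char) : ∀ t, (∀ kw ∈ T, ¬ kw.1 <+: (c :: t)) →
    foldRepl T (c :: t) = c :: foldRepl T t := by
  induction T with
  | nil => intro t _; rfl
  | cons kw T ih =>
    intro t h
    obtain ⟨⟨tk, hk, htne, -, hsp⟩, ⟨w', hw, -⟩⟩ := hT kw (by simp)
    show foldRepl T (PySem.Chars.replace (c :: t) kw.1 kw.2) = c :: foldRepl T (PySem.Chars.replace t kw.1 kw.2)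
    rw [replace_neg _ _ _ _ (h kw (by simp))]
    refine ih (fun kw' h' => hT kw' (by simp [h'])) (PySem.Chars.replace t kw.1 kw.2) ?_
    intro kw' h'
    obtain ⟨⟨tk', hk', htne', -, hsp'⟩, -⟩ := hT kw' (by simp [h'])
    rw [hk']
    by_cases hc : c = '\n'
    · subst hc
      intro hcontra
      have hptail : ¬ tk' <+: t := by
        intro hp
        exact h kw' (by simp [h']) (by rw [hk']; exact List.cons_prefix_cons.mpr ⟨rfl, hp⟩)
      have := pres_no_prefix kw.1 w' (by simp [hk]) t tk' htne' hsp' hptail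
      rw [← hw] at this
      exact this (List.cons_prefix_cons.mp hcontra).2
    · intro hcontra
      exact hc ((List.cons_prefix_cons.mp hcontra).1.symm)

lemma foldRepl_match (T1 T2 : List (List Char × List Char)) (k w : List Char)
    (hT : ∀ kw ∈ (T1 ++ (k,w) :: T2), keyShape kw)
    (hinc1 : ∀ kw ∈ T1, ¬ kw.1 <+: k ∧ ¬ k <+: kw.1)
    (hinc2 : ∀ kw ∈ T2, ¬ kw.1 <+: k ∧ ¬ k <+: kw.1) :
    ∀ rest, foldRepl (T1 ++ (k,w) :: T2) (k ++ rest) = w ++ foldRepl (T1 ++ (k,w) :: T2) rest := by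
  intro rest
  obtain ⟨⟨tk, hk, htne, hnl, hsp⟩, ⟨w', hw, hwn⟩⟩ := hT (k, w) (by simp)
  simp only at hk hw hwn
  subst hk hw
  have hdec : ∀ cs, foldRepl (T1 ++ ('\n'::tk, ' '::w') :: T2) cs
      = foldRepl T2 (PySem.Chars.replace (foldRepl T1 cs) ('\n'::tk) (' '::w')) := by
    intro cs; simp [foldRepl, List.foldl_append]
  have hT1 : ∀ kw ∈ T1, keyShape kw := fun kw h => hT kw (by simp [h])
  have hT2 : ∀ kw ∈ T2, keyShape kw := fun kw h => hT kw (by simp [h])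
  rw [hdec, hdec]
  have hpk := foldRepl_pass_key T1 hT1 tk hnl hinc1 rest
  simp only [List.cons_append] at hpk ⊢
  rw [hpk]
  rw [replace_pos ('\n'::tk) (' '::w') ('\n' :: (tk ++ foldRepl T1 rest)) (by simp)
      (List.cons_prefix_cons.mpr ⟨rfl, List.prefix_append _ _⟩)]
  rw [show List.drop (('\n'::tk : List Char).length) ('\n' :: (tk ++ foldRepl T1 rest))
      = foldRepl T1 rest by rw [List.length_cons, List.drop_succ_cons, List.drop_left]]
  have hpn := foldRepl_pass_nonl T2 hT2 (' '::w') hwn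
      (PySem.Chars.replace (foldRepl T1 rest) ('\n'::tk) (' '::w'))
  simp only [List.cons_append] at hpn ⊢
  rw [hpn]

lemma find?_unique {α : Type} (p : α → Bool) : ∀ (T : List α) (a : α), a ∈ T → p a = true →
    (∀ b ∈ T, b ≠ a → p b = false) → T.find? p = some a := by
  intro T
  induction T with
  | nil => intro a h; simp at h
  | cons x T ih =>
    intro a hmem hpa hothers
    by_cases hx : x = a
    · subst hx; simp [hpa]
    · rw [List.find?_cons, hothers x (by simp) hx]
      have : a ∈ T := by rcases List.mem_cons.mp hmem with h | h; exact absurd h.symm hx; exact h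
      exact ih a this hpa (fun b hb => hothers b (by simp [hb]))

lemma scan_nomatch (c : Char) (t : List Char)
    (h : ∀ kw ∈ latinTable, ¬ kw.1 <+: (c :: t)) :
    scanLatin (c :: t) = c :: scanLatin t := by
  have hfind : latinTable.find? (fun kw => kw.1.isPrefixOf (c :: t)) = none := by
    rw [List.find?_eq_none]
    intro kw hm
    simpa using fun hc => h kw hm (List.isPrefixOf_iff_prefix.mp hc)
  rw [scanLatin, hfind]

lemma scan_match (kw : List Char × List Char) (hmem : kw ∈ latinTable) (rest : List Char) :
    scanLatin (kw.1 ++ rest) = kw.2 ++ scanLatin rest := by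
  obtain ⟨k, w⟩ := kw
  obtain ⟨⟨tk, hk, -, -, -⟩, -⟩ := table_shape (k, w) hmem
  simp only at hk
  subst hk
  have hfind : latinTable.find? (fun kw' => kw'.1.isPrefixOf (('\n'::tk) ++ rest)) = some ('\n'::tk, w) := by
    refine find?_unique _ latinTable _ hmem ?_ ?_
    · exact List.isPrefixOf_iff_prefix.mpr (List.prefix_append _ _)
    · intro b hb hne
      have h1 := table_incomp b hb _ hmem hne
      have h2 := table_incomp _ hmem b hb (fun h => hne h.symm)
      exact Bool.eq_false_iff.mpr
        (fun hc => not_prefix_append h1 h2 (List.isPrefixOf_iff_prefix.mp hc))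
  simp only [List.cons_append] at hfind ⊢
  rw [scanLatin, hfind]
  show w ++ scanLatin (List.drop (('\n'::tk : List Char).length - 1) (tk ++ rest)) = _
  rw [show ('\n'::tk : List Char).length - 1 = tk.length by simp, List.drop_left]

-- ---- main induction ----

lemma scan_nil : scanLatin [] = [] := by
  rw [scanLatin]

set_option maxHeartbeats 1600000 in
lemma main_eq : ∀ (n : Nat) (cs : List Char), cs.length ≤ n → foldRepl latinTable cs = scanLatin cs := by
  intro n
  induction n with
  | zero =>
    intro cs hlen
    have : cs = [] := by cases cs <;> simp_all
    subst this
    rw [foldRepl_nil latinTable table_shape, scan_nil]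
  | succ n ih =>
    intro cs hlen
    cases cs with
    | nil => rw [foldRepl_nil latinTable table_shape, scan_nil]
    | cons c t =>
      by_cases hex : ∃ kw ∈ latinTable, kw.1 <+: (c :: t)
      · obtain ⟨kw, hmem, hpre⟩ := hex
        obtain ⟨k, w⟩ := kw
        obtain ⟨rest, hrest⟩ := hpre
        obtain ⟨T1, T2, hTsplit⟩ := List.append_of_mem hmem
        obtain ⟨⟨tk, hk, -, -, -⟩, -⟩ := table_shape (k, w) hmem
        simp only at hk
        have hnd := table_nodup
        rw [hTsplit] at hnd
        have hne1 : ∀ kw' ∈ T1, kw' ≠ (k, w) := by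
          intro kw' h' he
          subst he
          exact (List.disjoint_of_nodup_append hnd) h' (by simp)
        have hne2 : ∀ kw' ∈ T2, kw' ≠ (k, w) := by
          intro kw' h' he
          subst he
          have := List.Nodup.of_append_right hnd
          rw [List.nodup_cons] at this
          exact this.1 h'
        have hincs : ∀ kw' , kw' ∈ T1 ∨ kw' ∈ T2 → ¬ kw'.1 <+: k ∧ ¬ k <+: kw'.1 := by
          intro kw' h'
          have hm' : kw' ∈ latinTable := by
            rw [hTsplit]; rcases h' with h' | h' <;> simp [h']
          have hne : kw' ≠ (k, w) := by rcases h' with h' | h'; exacts [hne1 kw' h', hne2 kw' h']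
          have h1 := table_incomp kw' hm' (k, w) hmem hne
          have h2 := table_incomp (k, w) hmem kw' hm' (fun h => hne h.symm)
          exact ⟨h1, h2⟩
        have hkt : ∀ kw ∈ T1 ++ (k, w) :: T2, keyShape kw := by
          rw [← hTsplit]; exact table_shape
        have hmatch := foldRepl_match T1 T2 k w hkt
          (fun kw' h' => hincs kw' (Or.inl h')) (fun kw' h' => hincs kw' (Or.inr h')) rest
        have hscan := scan_match (k, w) hmem rest
        simp only at hscan
        have hr : rest.length ≤ n := by
          have hlen2 : (k ++ rest).length = (c :: t).length := by rw [hrest]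
          simp only [List.length_append, List.length_cons] at hlen2
          have : k.length ≥ 1 := by rw [hk]; simp
          simp only [List.length_cons] at hlen
          omega
        rw [← hrest, hTsplit, hmatch, ← hTsplit, hscan, ih rest hr]
      · push Not at hex
        rw [foldRepl_cons_nomatch latinTable table_shape c t hex, scan_nomatch c t hex,
          ih t (by simp at hlen; omega)]

lemma portA_eq_fold (text : String) :
    convert_latin_numbers_to_words text = String.ofList (foldRepl latinTable text.toList) := by
  have e1 : "\nI.".toList = ['\n','I','.'] := by decide
  have e2 : "\nII.".toList = ['\n','I','I','.'] := by decide
  have e3 : "\nIII.".toList = ['\n','I','I','I','.'] := by decide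
  have e4 : "\nIV.".toList = ['\n','I','V','.'] := by decide
  have e5 : "\nV.".toList = ['\n','V','.'] := by decide
  have e6 : "\nVI.".toList = ['\n','V','I','.'] := by decide
  have e7 : "\nVII.".toList = ['\n','V','I','I','.'] := by decide
  have e8 : "\nVIII.".toList = ['\n','V','I','I','I','.'] := by decide
  have e9 : "\nIX.".toList = ['\n','I','X','.'] := by decide
  have e10 : "\nX.".toList = ['\n','X','.'] := by decide
  have f1 : " One -".toList = [' ','O','n','e',' ','-'] := by decide
  have f2 : " Two -".toList = [' ','T','w','o',' ','-'] := by decide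
  have f3 : " Three -".toList = [' ','T','h','r','e','e',' ','-'] := by decide
  have f4 : " Four -".toList = [' ','F','o','u','r',' ','-'] := by decide
  have f5 : " Five -".toList = [' ','F','i','v','e',' ','-'] := by decide
  have f6 : " Six -".toList = [' ','S','i','x',' ','-'] := by decide
  have f7 : " Seven -".toList = [' ','S','e','v','e','n',' ','-'] := by decide
  have f8 : " Eight -".toList = [' ','E','i','g','h','t',' ','-'] := by decide
  have f9 : " Nine -".toList = [' ','N','i','n','e',' ','-'] := by decide
  have f10 : " Ten -".toList = [' ','T','e','n',' ','-'] := by decide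
  simp [convert_latin_numbers_to_words, latinToWords, foldRepl, latinTable, PySem.Str.replace,
    List.foldl, String.toList_ofList, e1,e2,e3,e4,e5,e6,e7,e8,e9,e10,f1,f2,f3,f4,f5,f6,f7,f8,f9,f10]

-- ===== VERDICT (by name: the statement is the Claim_ definition above) =====
theorem convert_latin_numbers_to_words_spec : Claim_equal_convert_latin_numbers_to_words := by
  intro text _
  show _ = _
  rw [portA_eq_fold, convert_latin_numbers_to_words_alt,
    main_eq text.toList.length text.toList le_rfl]
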